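-- pv_equiv track=rewrite | github.com/b-schneller/Neural-Machine-Translation-English-to-Spanish | src/data_preprocessing.py | create_bucket_dict
-- ===== SOURCE A (Python) =====
-- import math
--
-- def create_bucket_dict(eng_sentences, span_sentences):
--     sample_bucket_sizes = []
--     bucket_dict = {}
--     for eng_sentence, span_sentence in zip(eng_sentences, span_sentences):
--         max_len = max(len(eng_sentence.split()), len(span_sentence.split()))
--         rounded_max_len = roundup(max_len)
--         sample_bucket_sizes.append(rounded_max_len)
--     for i in range(5, max(sample_bucket_sizes) + 1, 5):
--         bucket_dict[i] = create_buckets(sample_bucket_sizes, i)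
--
--     return bucket_dict
--
-- def roundup(x):
--     return int(math.ceil((x + 1) / 5.0)) * 5  # x+1 to push *0 into next bucket to account for tokens
--
-- def create_buckets(buckets, bucket_len):
--     return [index for index, value in enumerate(buckets) if value == bucket_len]
-- ===== SOURCE B (Python) =====
-- def create_bucket_dict(eng_sentences, span_sentences):
--     # One indexing pass: group indices by their rounded bucket length directly,
--     # tracking the running maximum bucket, then emit every 5-bucket up to it.
--     groups = {}
--     max_value = 0
--     for index, (eng_sentence, span_sentence) in enumerate(zip(eng_sentences, span_sentences)):
--         max_len = max(len(eng_sentence.split()), len(span_sentence.split()))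
--         rounded = -(-(max_len + 1) // 5) * 5  # integer ceil((max_len+1)/5)*5
--         groups.setdefault(rounded, []).append(index)
--         if rounded > max_value:
--             max_value = rounded
--     return {i: groups.get(i, []) for i in range(5, max_value + 1, 5)}
-- ===== Notes on version B (the rewrite author's own statement) =====
-- stated objective: alternative
-- what changed: A re-scans the whole rounded-length list once per 5-bucket (create_buckets inside the range loop); B builds the index->bucket grouping in a single dict pass keyed by rounded length while tracking the running maximum, then emits each bucket by one lookup (O(N+B) work instead of O(N*B); measured 1.31x at the largest size, so not claimed as faster).
import Mathlib
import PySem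

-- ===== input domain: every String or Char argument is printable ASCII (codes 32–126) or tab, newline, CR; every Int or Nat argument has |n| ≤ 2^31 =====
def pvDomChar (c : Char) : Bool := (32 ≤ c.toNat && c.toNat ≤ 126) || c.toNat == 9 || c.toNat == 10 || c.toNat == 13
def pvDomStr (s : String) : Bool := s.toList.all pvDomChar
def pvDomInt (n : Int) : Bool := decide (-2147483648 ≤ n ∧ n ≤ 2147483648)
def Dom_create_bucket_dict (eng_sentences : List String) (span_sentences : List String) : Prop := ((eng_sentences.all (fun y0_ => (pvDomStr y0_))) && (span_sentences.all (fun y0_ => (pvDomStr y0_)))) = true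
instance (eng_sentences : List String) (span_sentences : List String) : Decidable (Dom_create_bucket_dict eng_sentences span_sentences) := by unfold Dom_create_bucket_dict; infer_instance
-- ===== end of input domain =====

-- B builds the index grouping in one dict pass instead of re-scanning the rounded-length
-- list once per bucket (A raises ValueError on empty input; excluded by Pre_).


-- ===== PORT A =====
-- roundup: int(math.ceil((x+1)/5.0))*5, rendered as the exact integer ceiling division
-- (exact: no float rounding error at the magnitudes of word counts in the domain)
def pvRoundup (x : Int) : Int := (-(PySem.Int.floordiv (-(x + 1)) 5)) * 5

-- create_buckets: [index for index, value in enumerate(buckets) if value == bucket_len]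
def pvCreateBuckets (buckets : List Int) (bucket_len : Int) : List Int :=
  ((PySem.List.enumerate buckets 0).filter (fun p => p.2 == bucket_len)).map (fun p => p.1)

def create_bucket_dict (eng_sentences : List String) (span_sentences : List String) : List (Int × List Int) :=
  let sample_bucket_sizes :=
    (List.zip eng_sentences span_sentences).foldl
      (fun acc p =>
        let max_len : Int := max ((PySem.Str.split₀ p.1).length : Int) ((PySem.Str.split₀ p.2).length : Int)
        acc ++ [pvRoundup max_len]) []
  match PySem.List.max? sample_bucket_sizes (fun y => y) with
  | none => []   -- Python raises ValueError here (max of empty list); excluded by Pre_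
  | some m =>
      ((PySem.List.pyRange 5 (m + 1) 5).foldl
        (fun (d : PySem.Dict Int (List Int)) i => d.insert i (pvCreateBuckets sample_bucket_sizes i))
        PySem.Dict.empty).items

-- ===== PORT B =====
-- groups.setdefault(rounded, []).append(index) is Dict.modify rounded [] (· ++ [index])
def create_bucket_dict_alt (eng_sentences : List String) (span_sentences : List String) : List (Int × List Int) :=
  let st :=
    (PySem.List.enumerate (List.zip eng_sentences span_sentences) 0).foldl
      (fun (st : PySem.Dict Int (List Int) × Int) p =>
        let max_len : Int := max ((PySem.Str.split₀ p.2.1).length : Int) ((PySem.Str.split₀ p.2.2).length : Int)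
        let rounded := (-(PySem.Int.floordiv (-(max_len + 1)) 5)) * 5
        (st.1.modify rounded [] (fun l => l ++ [p.1]), if rounded > st.2 then rounded else st.2))
      (PySem.Dict.empty, 0)
  (PySem.List.pyRange 5 (st.2 + 1) 5).map (fun i => (i, st.1.getD i []))

-- ===== PRECONDITION & SPEC =====
-- A raises ValueError (max of the empty list) when zip(eng, span) is empty, i.e. either list is empty.
def Pre_create_bucket_dict (eng_sentences : List String) (span_sentences : List String) : Prop :=
  eng_sentences ≠ [] ∧ span_sentences ≠ []
instance (eng_sentences : List String) (span_sentences : List String) : Decidable (Pre_create_bucket_dict eng_sentences span_sentences) := by unfold Pre_create_bucket_dict; infer_instance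
def pvWitness_create_bucket_dict : List String × List String := (["a b"], ["uno dos tres"])

def Spec_create_bucket_dict (eng_sentences : List String) (span_sentences : List String) (out : List (Int × List Int)) : Prop := out = create_bucket_dict_alt eng_sentences span_sentences
instance (eng_sentences : List String) (span_sentences : List String) (out : List (Int × List Int)) : Decidable (Spec_create_bucket_dict eng_sentences span_sentences out) := by unfold Spec_create_bucket_dict; infer_instance

-- ===== CLAIM (what is proved, stated in full; the proofs are below) =====
def Claim_equal_create_bucket_dict : Prop := ∀ (eng_sentences : List String) (span_sentences : List String), Dom_create_bucket_dict eng_sentences span_sentences → Pre_create_bucket_dict eng_sentences span_sentences → Spec_create_bucket_dict eng_sentences span_sentences (create_bucket_dict eng_sentences span_sentences)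

-- ===== LEMMAS AND PROOFS =====

-- the rounded length of a zipped pair (shared by both ports)
def pvRnd (p : String × String) : Int :=
  pvRoundup (max ((PySem.Str.split₀ p.1).length : Int) ((PySem.Str.split₀ p.2).length : Int))

theorem pvRoundup_ge (x : Int) (hx : 0 ≤ x) : 5 ≤ pvRoundup x := by
  have h : PySem.Int.floordiv (-(x + 1)) 5 < 0 :=
    (PySem.Int.floordiv_lt_iff_lt_mul (by norm_num)).2 (by omega)
  unfold pvRoundup; omega

theorem pvRnd_ge (p : String × String) : 5 ≤ pvRnd p := by
  exact pvRoundup_ge _ (le_max_of_le_left (Int.natCast_nonneg _))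

theorem foldl_append_map {α β : Type} (f : α → β) :
    ∀ (l : List α) (acc : List β), l.foldl (fun a x => a ++ [f x]) acc = acc ++ l.map f := by
  intro l
  induction l with
  | nil => simp
  | cons x t ih => intro acc; simp [ih]

theorem foldl_pair_decompose {α δ γ : Type} (f : δ → α → δ) (g : γ → α → γ) :
    ∀ (l : List α) (d : δ) (m : γ),
      l.foldl (fun st p => (f st.1 p, g st.2 p)) (d, m) = (l.foldl f d, l.foldl g m) := by
  intro l
  induction l with
  | nil => intro d m; rfl
  | cons x t ih => intro d m; simp [ih]

theorem enumerate_map {α β : Type} (f : α → β) :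
    ∀ (l : List α) (s : Int),
      PySem.List.enumerate (l.map f) s = (PySem.List.enumerate l s).map (fun p => (p.1, f p.2)) := by
  intro l
  induction l with
  | nil => intro s; rfl
  | cons x t ih => intro s; simp [PySem.List.enumerate_cons, ih]

-- B's grouped bucket for key i equals A's create_buckets on the rounded-length list
theorem groups_getD (l : List (String × String)) (i : Int) :
    ((PySem.List.enumerate l 0).foldl
        (fun (d : PySem.Dict Int (List Int)) p => d.modify (pvRnd p.2) [] (fun v => v ++ [p.1]))
        PySem.Dict.empty).getD i []
      = pvCreateBuckets (l.map pvRnd) i := by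
  have h1 : ((PySem.List.enumerate l 0).foldl
      (fun (d : PySem.Dict Int (List Int)) p => d.modify (pvRnd p.2) [] (fun v => v ++ [p.1]))
      PySem.Dict.empty)
      = (((PySem.List.enumerate l 0).map (fun p => (pvRnd p.2, p.1))).foldl
          (fun (d : PySem.Dict Int (List Int)) q => d.modify q.1 [] (fun v => v ++ [q.2]))
          PySem.Dict.empty) := by
    rw [List.foldl_map]
  rw [h1, PySem.Dict.getD_foldl_modify_append]
  unfold pvCreateBuckets
  rw [enumerate_map]
  simp [List.filter_map, List.map_map, Function.comp_def]

-- running max with start 0 over a nonempty list of values ≥ 5 is Python's max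
theorem foldl_runmax (x : Int) (t : List Int) (hx : 5 ≤ x) :
    (x :: t).foldl (fun m r => if r > m then r else m) 0 = t.foldl max x := by
  have hfun : (fun (m r : Int) => if r > m then r else m) = max := by
    funext m r; simp [max_def]; split_ifs <;> omega
  rw [hfun]
  simp only [List.foldl_cons]
  have : max 0 x = x := by omega
  rw [this]

theorem maxfold_enum (l : List (String × String)) :
    (PySem.List.enumerate l 0).foldl (fun m p => if pvRnd p.2 > m then pvRnd p.2 else m) 0
      = (l.map pvRnd).foldl (fun m r => if r > m then r else m) 0 := by
  conv_rhs => rw [← PySem.List.map_snd_enumerate l 0]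
  rw [List.map_map, List.foldl_map]
  rfl

theorem nodup_pyRange5 (b : Int) : (PySem.List.pyRange 5 b 5).Nodup := by
  rw [PySem.List.pyRange_of_pos 5 b (by norm_num : (0:Int) < 5)]
  exact (List.nodup_range).map (fun k1 k2 h => by omega)

-- ===== VERDICT (by name: the statement is the Claim_ definition above) =====
theorem create_bucket_dict_spec : Claim_equal_create_bucket_dict := by
  intro eng span _ hpre
  obtain ⟨he, hs⟩ := hpre
  obtain ⟨p0, lt, hcons⟩ : ∃ p0 lt, List.zip eng span = p0 :: lt := by
    cases eng with
    | nil => exact absurd rfl he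
    | cons a at' =>
      cases span with
      | nil => exact absurd rfl hs
      | cons b bt => exact ⟨(a, b), at'.zip bt, rfl⟩
  unfold Spec_create_bucket_dict create_bucket_dict create_bucket_dict_alt
  rw [hcons]
  simp only [pvRoundup]
  have hA := foldl_append_map pvRnd (p0 :: lt) []
  simp only [pvRnd, pvRoundup, List.nil_append] at hA
  rw [hA]
  have hB := foldl_pair_decompose
      (fun (d : PySem.Dict Int (List Int)) (p : Int × String × String) =>
        d.modify (pvRnd p.2) [] (fun v => v ++ [p.1]))
      (fun (m : Int) (p : Int × String × String) => if pvRnd p.2 > m then pvRnd p.2 else m)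
      (PySem.List.enumerate (p0 :: lt) 0) PySem.Dict.empty 0
  simp only [pvRnd, pvRoundup] at hB
  rw [hB]
  have hmf := maxfold_enum (p0 :: lt)
  simp only [pvRnd, pvRoundup] at hmf
  rw [hmf]
  have hrun := foldl_runmax (pvRnd p0) (lt.map pvRnd) (pvRnd_ge p0)
  have hmx := PySem.List.max?_id_cons (pvRnd p0) (lt.map pvRnd)
  simp only [pvRnd, pvRoundup] at hrun hmx
  rw [List.map_cons]
  simp only [pvRnd, pvRoundup]
  rw [hrun, hmx]
  simp only []
  rw [PySem.Dict.items_foldl_insert_fresh _ (fun i => i) _ _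
        (fun a _ => PySem.Dict.contains_empty a)
        (by simpa using nodup_pyRange5 _)]
  rw [show (PySem.Dict.empty : PySem.Dict Int (List Int)).items = [] from rfl, List.nil_append]
  refine List.map_congr_left fun i _ => ?_
  have hg := groups_getD (p0 :: lt) i
  simp only [pvRnd, pvRoundup] at hg
  rw [hg]
  simp only [List.map_cons, pvRnd, pvRoundup]
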